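-- pv_equiv track=rewrite | github.com/itexussoft/itx-spec-kit | extensions/itx-gates/hooks/smell_mapping.py | _primary_refactoring
-- ===== SOURCE A (Python) =====
-- from typing import Any, Dict, Iterable, List, Sequence
--
-- def _primary_refactoring(smell: Dict[str, Any]) -> Dict[str, Any] | None:
--     refactorings = smell.get("refactorings")
--     if not isinstance(refactorings, list) or not refactorings:
--         return None
--     ranked = sorted(
--         [item for item in refactorings if isinstance(item, dict)],
--         key=lambda item: int(item.get("priority")) if isinstance(item.get("priority"), int) else 999,
--     )
--     return ranked[0] if ranked else None
-- ===== SOURCE B (Python) =====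
-- from typing import Any, Dict
--
-- def _primary_refactoring(smell: Dict[str, Any]) -> Dict[str, Any] | None:
--     # single pass: running first-minimum by priority (smell maps str -> list of dict[str, int],
--     # so the entries are dicts and their priorities ints; absent priority counts as 999)
--     refactorings = smell.get("refactorings")
--     if not refactorings:
--         return None
--     best = None
--     best_p = None
--     for item in refactorings:
--         p = item.get("priority", 999)
--         if best is None or p < best_p:
--             best = item
--             best_p = p
--     return best
-- ===== Notes on version B (the rewrite author's own statement) =====
-- stated objective: alternative
-- what changed: replaces A's build-filtered-list-then-stable-sort-then-take-head with a single explicit loop that keeps the running first minimum by priority, relying on the declared dict[str, list[dict[str, int]]] shape instead of A's isinstance re-checks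
import Mathlib
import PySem

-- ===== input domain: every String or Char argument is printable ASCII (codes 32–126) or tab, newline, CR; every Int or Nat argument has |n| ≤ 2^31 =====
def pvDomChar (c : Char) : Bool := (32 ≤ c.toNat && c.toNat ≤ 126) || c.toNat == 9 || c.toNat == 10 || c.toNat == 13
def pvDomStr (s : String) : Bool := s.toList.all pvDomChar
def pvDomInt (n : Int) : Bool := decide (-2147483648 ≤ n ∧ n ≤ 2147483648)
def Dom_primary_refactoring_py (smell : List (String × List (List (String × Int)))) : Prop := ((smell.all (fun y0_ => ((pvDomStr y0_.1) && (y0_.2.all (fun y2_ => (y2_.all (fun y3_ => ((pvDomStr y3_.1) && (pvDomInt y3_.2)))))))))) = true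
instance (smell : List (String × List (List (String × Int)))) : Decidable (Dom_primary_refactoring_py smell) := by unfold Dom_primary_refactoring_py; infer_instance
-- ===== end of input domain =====

-- B replaces A's build-list-then-stable-sort-then-take-head with a single running-first-minimum loop over the same priority key (return value only; neither program mutates its argument).

-- ===== PORT A =====
-- A's key: int(item.get("priority")) if isinstance(item.get("priority"), int) else 999; under the type
-- convention "priority" values are Int, so isinstance is a presence test and int() is the identity —
-- which is also exactly B's key item.get("priority", 999), so both ports share this helper.
def pvPrio (item : List (String × Int)) : Int :=
  match item.lookup "priority" with
  | some p => p
  | none => 999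

def primary_refactoring_py (smell : List (String × List (List (String × Int)))) : Option (List (String × Int)) :=
  match smell.lookup "refactorings" with      -- smell.get("refactorings"); None → 'not isinstance(..., list)' branch
  | none => none
  | some refactorings =>
    if refactorings = [] then none            -- 'not refactorings'
    else
      -- [item for item in refactorings if isinstance(item, dict)]: every item is a dict under the type, so the filter keeps all
      let ranked := PySem.List.sorted refactorings pvPrio false
      match ranked with                       -- ranked[0] if ranked else None
      | [] => none
      | r :: _ => some r

-- ===== PORT B =====
-- loop body: p = item.get("priority", 999); if best is None or p < best_p: best, best_p = item, p
-- ((best, best_p) carried together as Option (item × p))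
def pvBestStep (st : Option ((List (String × Int)) × Int)) (item : List (String × Int)) :
    Option ((List (String × Int)) × Int) :=
  let p := pvPrio item                    -- item.get("priority", 999)
  match st with
  | none => some (item, p)                -- best is None
  | some (b, bp) => if p < bp then some (item, p) else some (b, bp)

def primary_refactoring_py_alt (smell : List (String × List (List (String × Int)))) : Option (List (String × Int)) :=
  match smell.lookup "refactorings" with  -- smell.get("refactorings"); None falls under 'not refactorings'
  | none => none
  | some refactorings =>
    if refactorings = [] then none        -- 'not refactorings'
    else
      -- best = None; best_p = None; for item in refactorings: pvBestStep; return best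
      (refactorings.foldl pvBestStep none).map (fun st => st.1)

-- ===== PRECONDITION & SPEC =====
def Spec_primary_refactoring_py (smell : List (String × List (List (String × Int)))) (out : Option (List (String × Int))) : Prop := out = primary_refactoring_py_alt smell
instance (smell : List (String × List (List (String × Int)))) (out : Option (List (String × Int))) : Decidable (Spec_primary_refactoring_py smell out) := by unfold Spec_primary_refactoring_py; infer_instance

-- ===== CLAIM (what is proved, stated in full; the proofs are below) =====
def Claim_equal_primary_refactoring_py : Prop := ∀ (smell : List (String × List (List (String × Int)))), Dom_primary_refactoring_py smell → Spec_primary_refactoring_py smell (primary_refactoring_py smell)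

-- ===== LEMMAS AND PROOFS =====

-- head of insertBy is the min-choice of the new element against the old head
theorem pv_head?_insertBy {α κ : Type} [LT κ] [DecidableLT κ] (key : α → κ) (x : α) (ys : List α) :
    (PySem.List.insertBy (fun a b => decide (key a < key b)) x ys).head? =
      some (match ys.head? with
            | none => x
            | some y => if key x < key y then x else y) := by
  cases ys with
  | nil => simp [PySem.List.insertBy]
  | cons y t =>
    simp only [PySem.List.insertBy, List.head?]
    by_cases h : key x < key y <;> simp [h]

-- the head of the insertion-sort fold obeys exactly min?'s fold recurrence
theorem pv_foldl_insertBy_head? {α κ : Type} [LT κ] [DecidableLT κ] (key : α → κ)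
    (xs : List α) (acc : List α) :
    (xs.foldl (fun acc x => PySem.List.insertBy (fun a b => decide (key a < key b)) x acc) acc).head? =
      xs.foldl (fun o x =>
        match o with
        | none => some x
        | some m => if key x < key m then some x else some m) acc.head? := by
  induction xs generalizing acc with
  | nil => rfl
  | cons x t ih =>
    simp only [List.foldl_cons]
    rw [ih, pv_head?_insertBy]
    cases acc with
    | nil => rfl
    | cons y ys =>
      simp only [List.head?]
      by_cases h : key x < key y <;> simp [h]

-- min? is the head of Python's stable sort
theorem pv_min?_eq_head_sorted {α κ : Type} [LT κ] [DecidableLT κ] (key : α → κ) (xs : List α) :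
    (PySem.List.sorted xs key false).head? = PySem.List.min? xs key := by
  simp only [PySem.List.sorted, PySem.List.min?]
  simpa using pv_foldl_insertBy_head? key xs []

-- B's fold over (best, best_p) is min?'s fold with the key value carried alongside
theorem pv_foldl_best_pair (xs : List (List (String × Int))) (o : Option (List (String × Int))) :
    xs.foldl pvBestStep (o.map (fun m => (m, pvPrio m))) =
      (xs.foldl
        (fun o x =>
          match o with
          | none => some x
          | some m => if pvPrio x < pvPrio m then some x else some m) o).map (fun m => (m, pvPrio m)) := by
  induction xs generalizing o with
  | nil => rfl
  | cons x t ih =>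
    simp only [List.foldl_cons]
    rw [← ih]
    congr 1
    cases o with
    | none => rfl
    | some b =>
      simp only [Option.map_some]
      by_cases h : pvPrio x < pvPrio b <;> simp [pvBestStep, h]

-- ===== VERDICT (by name: the statement is the Claim_ definition above) =====
theorem primary_refactoring_py_spec : Claim_equal_primary_refactoring_py := by
  intro smell _
  unfold Spec_primary_refactoring_py primary_refactoring_py primary_refactoring_py_alt
  cases smell.lookup "refactorings" with
  | none => rfl
  | some refs =>
    by_cases h : refs = []
    · simp [h]
    · simp only [h, if_false]
      have hb := pv_foldl_best_pair refs none
      simp only [Option.map_none] at hb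
      rw [hb]
      have he : List.foldl
          (fun o x =>
            match o with
            | none => some x
            | some m => if pvPrio x < pvPrio m then some x else some m)
          none refs = PySem.List.min? refs pvPrio := by
        simp only [PySem.List.min?]
        congr 1
        funext o x
        cases o <;> rfl
      rw [he, ← pv_min?_eq_head_sorted pvPrio refs]
      cases hs : PySem.List.sorted refs pvPrio false with
      | nil => exact absurd ((PySem.List.sorted_eq_nil_iff _ _ _).mp hs) h
      | cons r t => simp
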